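-- pv_equiv track=rewrite | github.com/loupij/Tableur-python | mainEP.py | cellule_index
-- ===== SOURCE A (Python) =====
-- def cellule_index(cellule_nom):
--     """
--     Renvoie les coordonnés à partir d'une string de cellule (par exemple cellule_index("A1") renvoie (0,0))
--     """
--     col = 0
--     rows = 0
--     for char in cellule_nom:
--         if char.isdigit():
--             rows = int(cellule_nom[cellule_nom.index(char):]) - 1
--             break
--         col = col * 26 + (ord(char.upper()) - ord("A"))
--     return (rows, col)
-- ===== SOURCE B (Python) =====
-- def cellule_index(cellule_nom):
--     """
--     Renvoie les coordonnés à partir d'une string de cellule (par exemple cellule_index("A1") renvoie (0,0))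
--     """
--     i = next((k for k, ch in enumerate(cellule_nom) if ch.isdigit()), len(cellule_nom))
--     col, place = 0, 1
--     for ch in reversed(cellule_nom[:i]):
--         col += (ord(ch.upper()) - ord("A")) * place
--         place *= 26
--     rows = int(cellule_nom[i:]) - 1 if i < len(cellule_nom) else 0
--     return (rows, col)
-- ===== Notes on version B (the rewrite author's own statement) =====
-- stated objective: alternative
-- what changed: B drops A's single left-to-right Horner scan-with-break (which re-finds the digit's position with str.index and slices inside the loop): it locates the first-digit boundary via enumerate, then walks the letter prefix RIGHT-to-left accumulating explicit place values (place *= 26) instead of Horner's col*26+digit, and parses the numeric suffix with one int(); A and B raise ValueError on exactly the same inputs, which Pre_ excludes.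
import Mathlib
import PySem

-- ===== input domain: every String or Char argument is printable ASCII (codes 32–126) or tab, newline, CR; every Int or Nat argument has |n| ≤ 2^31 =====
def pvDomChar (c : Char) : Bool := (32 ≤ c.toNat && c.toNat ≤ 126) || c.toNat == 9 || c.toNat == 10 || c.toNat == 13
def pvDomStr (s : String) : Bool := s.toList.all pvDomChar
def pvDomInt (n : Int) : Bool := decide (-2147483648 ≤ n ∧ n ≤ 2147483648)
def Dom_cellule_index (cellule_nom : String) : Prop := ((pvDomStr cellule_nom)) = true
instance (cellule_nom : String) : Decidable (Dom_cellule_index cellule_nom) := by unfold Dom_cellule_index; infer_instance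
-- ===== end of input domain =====

-- B replaces A's left-to-right Horner scan-with-break (which re-finds the digit via str.index and
-- slices inside the loop) by: boundary via enumerate, then a RIGHT-to-left pass over the letters
-- accumulating explicit place values (units, 26s, 676s, ...); objective: alternative, same cost.

-- char.isdigit()
def pvIsDig (c : Char) : Bool := PySem.Chars.strIsdigit [c]
-- ord(char.upper()) (char.upper() of a single char is a single char on this ASCII domain)
def pvOrdUp (c : Char) : Int := (((PySem.Chars.upper [c]).headD c).toNat : Int)

-- ===== PORT A =====
-- the for-loop with break, carrying col; `full` is the whole string (A slices it via str.index)
def celluleLoopA (full : List Char) : List Char → Int → Int × Int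
  | [], col => (0, col)
  | c :: rest, col =>
    if pvIsDig c then
      ((PySem.Int.ofChars? (PySem.List.slice full (some (PySem.Chars.find full [c])) none)).getD 1 - 1, col)
    else
      celluleLoopA full rest (col * 26 + (pvOrdUp c - 65))

def cellule_index (cellule_nom : String) : Int × Int :=
  celluleLoopA cellule_nom.toList cellule_nom.toList 0

-- ===== PORT B =====
-- next((k for k, ch in enumerate(s) if ch.isdigit()), len(s))
def pvFirstDigit : List Char → Nat
  | [] => 0
  | c :: rest => if pvIsDig c then 0 else pvFirstDigit rest + 1

def cellule_index_alt (cellule_nom : String) : Int × Int :=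
  let cs := cellule_nom.toList
  let i := pvFirstDigit cs
  -- for ch in reversed(s[:i]): col += (ord(ch.upper()) - 65) * place; place *= 26
  let cp := (cs.take i).reverse.foldl
      (fun (cp : Int × Int) c => (cp.1 + (pvOrdUp c - 65) * cp.2, cp.2 * 26)) (0, 1)
  let rows := if i < cs.length then (PySem.Int.ofChars? (cs.drop i)).getD 1 - 1 else 0
  (rows, cp.1)

-- ===== PRECONDITION & SPEC =====
-- Pre_ excludes exactly the inputs where int() raises ValueError in both programs:
-- a digit occurs but the substring from the first digit is not a valid int literal.
def Pre_cellule_index (cellule_nom : String) : Prop :=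
  cellule_nom.toList.all (fun c => !PySem.Chars.strIsdigit [c]) = true ∨
  (PySem.Int.ofChars? (cellule_nom.toList.dropWhile (fun c => !PySem.Chars.strIsdigit [c]))).isSome = true
instance (cellule_nom : String) : Decidable (Pre_cellule_index cellule_nom) := by
  unfold Pre_cellule_index; infer_instance

def pvWitness_cellule_index : String := "AB12"

def Spec_cellule_index (cellule_nom : String) (out : Int × Int) : Prop := out = cellule_index_alt cellule_nom
instance (cellule_nom : String) (out : Int × Int) : Decidable (Spec_cellule_index cellule_nom out) := by unfold Spec_cellule_index; infer_instance

-- ===== CLAIM (what is proved, stated in full; the proofs are below) =====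
def Claim_equal_cellule_index : Prop := ∀ (cellule_nom : String), Dom_cellule_index cellule_nom → Pre_cellule_index cellule_nom → Spec_cellule_index cellule_nom (cellule_index cellule_nom)

-- ===== LEMMAS AND PROOFS =====

-- positional value of a letter list (most significant first)
def pvPos : List Char → Int
  | [] => 0
  | c :: t => (pvOrdUp c - 65) * 26 ^ t.length + pvPos t

lemma rev_fold_pos (L : List Char) : ∀ (col place : Int),
    L.reverse.foldl (fun (cp : Int × Int) c => (cp.1 + (pvOrdUp c - 65) * cp.2, cp.2 * 26)) (col, place)
      = (col + pvPos L * place, place * 26 ^ L.length) := by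
  induction L with
  | nil => intro col place; simp [pvPos]
  | cons c t ih =>
    intro col place
    simp only [List.reverse_cons, List.foldl_append, ih, List.foldl_cons, List.foldl_nil, pvPos]
    rw [Prod.mk.injEq, List.length_cons]
    constructor <;> ring

lemma horner_eq_pos (L : List Char) : ∀ (col : Int),
    L.foldl (fun col c => col * 26 + (pvOrdUp c - 65)) col = col * 26 ^ L.length + pvPos L := by
  induction L with
  | nil => intro col; simp [pvPos]
  | cons c t ih =>
    intro col
    simp only [List.foldl_cons, ih, pvPos, List.length_cons]
    ring

lemma singleton_prefix_iff (c : Char) (ys : List Char) : [c] <+: ys ↔ ys.head? = some c := by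
  cases ys with
  | nil => simp
  | cons y t => simp [List.cons_prefix_cons, eq_comm]

-- str.index of the first digit points at the end of the non-digit prefix
lemma find_first_digit (pref : List Char) (c : Char) (rest : List Char)
    (hp : ∀ x ∈ pref, pvIsDig x = false) (hc : pvIsDig c = true) :
    PySem.Chars.find (pref ++ c :: rest) [c] = (pref.length : Int) := by
  have hmem : c ∈ pref ++ c :: rest := by simp
  have hnn : 0 ≤ PySem.Chars.find (pref ++ c :: rest) [c] := by
    rw [PySem.Chars.find_nonneg_iff]
    exact (List.singleton_infix_iff c _).2 hmem
  obtain ⟨hpre, hmin⟩ := PySem.Chars.find_spec hnn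
  set k := (PySem.Chars.find (pref ++ c :: rest) [c]).toNat with hk
  have hkc : (pref ++ c :: rest)[k]? = some c := by
    rw [← List.head?_drop, ← singleton_prefix_iff]; exact hpre
  have hle : k ≤ pref.length := by
    by_contra h
    rw [not_le] at h
    have : ¬ [c] <+: (pref ++ c :: rest).drop pref.length := hmin pref.length h
    rw [singleton_prefix_iff, List.head?_drop] at this
    exact this (by simp)
  have heq : k = pref.length := by
    rcases lt_or_eq_of_le hle with hlt | h
    · exfalso
      have : (pref ++ c :: rest)[k]? = pref[k]? := List.getElem?_append_left hlt
      rw [this] at hkc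
      have hcm : c ∈ pref := List.mem_of_getElem? hkc
      have := hp c hcm
      rw [hc] at this; exact Bool.true_eq_false.mp this
    · exact h
  omega

-- A's loop equals the split computation with a Horner fold over the letter prefix
lemma loopA_eq (cs : List Char) : ∀ (pref : List Char) (col : Int),
    (∀ x ∈ pref, pvIsDig x = false) →
    celluleLoopA (pref ++ cs) cs col =
      ((if pvFirstDigit cs < cs.length then
          (PySem.Int.ofChars? (cs.drop (pvFirstDigit cs))).getD 1 - 1 else 0),
       (cs.take (pvFirstDigit cs)).foldl (fun col c => col * 26 + (pvOrdUp c - 65)) col) := by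
  induction cs with
  | nil => intro pref col hp; simp [celluleLoopA, pvFirstDigit]
  | cons c rest ih =>
    intro pref col hp
    by_cases hc : pvIsDig c = true
    · simp only [celluleLoopA, hc, if_pos, pvFirstDigit]
      rw [find_first_digit pref c rest hp hc,
          PySem.List.slice_from_natCast, List.drop_left]
      simp
    · have hc' : pvIsDig c = false := by simpa using hc
      simp only [celluleLoopA, hc', Bool.false_eq_true, if_neg, not_false_iff]
      have hp' : ∀ x ∈ pref ++ [c], pvIsDig x = false := by
        intro x hx
        rcases List.mem_append.mp hx with h | h
        · exact hp x h
        · simp at h; subst h; exact hc'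
      have := ih (pref ++ [c]) (col * 26 + (pvOrdUp c - 65)) hp'
      rw [List.append_assoc] at this
      simp only [List.singleton_append] at this
      rw [this]
      simp [pvFirstDigit, hc', List.take_succ_cons, List.drop_succ_cons]

-- ===== VERDICT (by name: the statement is the Claim_ definition above) =====
theorem cellule_index_spec : Claim_equal_cellule_index := by
  intro s _ _
  unfold Spec_cellule_index cellule_index cellule_index_alt
  have hA := loopA_eq s.toList [] 0 (by simp)
  simp only [List.nil_append] at hA
  rw [hA]
  simp only [rev_fold_pos, horner_eq_pos]
  simp
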